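-- pv_equiv track=rewrite | github.com/Expelliarmus923/PythonSrc | codewar/SequenceSum.py | sum_of_n
-- ===== SOURCE A (Python) =====
-- def sum_of_n(n):
--     sum = 0
--     reslut = []
--     dir = 1
--     m = abs(n)
--     if n < 0:
--         dir = -1
--     for i in range(m+1):
--         sum += i
--         reslut.append(dir*sum)
--
--     return reslut
-- ===== SOURCE B (Python) =====
-- def sum_of_n(n):
--     m = abs(n)
--     t = m * (m + 1) // 2
--     out = []
--     while m >= 0:
--         out.append(t if n >= 0 else -t)
--         t -= m
--         m -= 1
--     out.reverse()
--     return out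
-- ===== Notes on version B (the rewrite author's own statement) =====
-- stated objective: alternative
-- what changed: Builds the list back-to-front: starts from the total triangular number of m=abs(n) and walks down subtracting m each step, then reverses, instead of A's forward running-sum accumulator.
import Mathlib
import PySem

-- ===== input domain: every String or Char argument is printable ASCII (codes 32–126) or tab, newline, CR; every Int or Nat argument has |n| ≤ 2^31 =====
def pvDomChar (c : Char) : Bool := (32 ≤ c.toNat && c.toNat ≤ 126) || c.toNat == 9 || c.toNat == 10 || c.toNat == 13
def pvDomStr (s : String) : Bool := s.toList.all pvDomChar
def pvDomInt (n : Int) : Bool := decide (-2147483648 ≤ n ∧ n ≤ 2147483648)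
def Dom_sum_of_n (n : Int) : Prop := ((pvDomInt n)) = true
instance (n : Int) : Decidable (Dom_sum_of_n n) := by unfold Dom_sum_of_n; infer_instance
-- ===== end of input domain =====

-- B builds the list back-to-front from the total triangular number, subtracting m each step, then reverses (alternative; same O(|n|) cost).

-- ===== PORT A =====
def sum_of_n (n : Int) : List Int :=
  let dir : Int := if n < 0 then -1 else 1
  let m : Int := |n|
  ((PySem.List.pyRange 0 (m + 1) 1).foldl
    (fun (st : Int × List Int) i => (st.1 + i, st.2 ++ [dir * (st.1 + i)]))
    (0, [])).2

-- ===== PORT B =====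
-- B's while loop runs m+1 times (m from |n| down to 0); fuel = |n|+1 makes that count explicit.
def sum_of_n_altLoop (neg : Bool) : Nat → Int → Int → List Int → List Int
  | 0, _, _, out => out
  | k + 1, m, t, out => sum_of_n_altLoop neg k (m - 1) (t - m) (out ++ [if neg then -t else t])

def sum_of_n_alt (n : Int) : List Int :=
  let m : Int := |n|
  let t : Int := PySem.Int.floordiv (m * (m + 1)) 2
  (sum_of_n_altLoop (decide (¬ 0 ≤ n)) (n.natAbs + 1) m t []).reverse

-- ===== PRECONDITION & SPEC =====
def Spec_sum_of_n (n : Int) (out : List Int) : Prop := out = sum_of_n_alt n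
instance (n : Int) (out : List Int) : Decidable (Spec_sum_of_n n out) := by unfold Spec_sum_of_n; infer_instance

-- ===== CLAIM (what is proved, stated in full; the proofs are below) =====
def Claim_equal_sum_of_n : Prop := ∀ (n : Int), Dom_sum_of_n n → Spec_sum_of_n n (sum_of_n n)

-- ===== LEMMAS AND PROOFS =====

-- Triangular number via Python floor division equals exact ediv (numerator even, divisor positive).
lemma tri_floordiv (j : Int) : PySem.Int.floordiv (j * (j + 1)) 2 = j * (j + 1) / 2 :=
  PySem.Int.floordiv_eq_ediv_of_pos (by norm_num)

lemma tri_pred (j : Int) : j * (j + 1) / 2 - j = (j - 1) * j / 2 := by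
  obtain ⟨c, hc⟩ : Even (j * (j + 1)) := Int.even_mul_succ_self j
  have e : (j - 1) * j = j * (j + 1) - 2 * j := by ring
  omega

-- Invariant of A's loop after processing 0..k-1: sum = k*(k-1)/2, result = the triangular closed forms.
lemma sum_of_n_fold (dir : Int) (k : Nat) :
    ((PySem.List.pyRange 0 (k : Int) 1).foldl
      (fun (st : Int × List Int) i => (st.1 + i, st.2 ++ [dir * (st.1 + i)]))
      (0, []))
    = ((k : Int) * ((k : Int) - 1) / 2,
       (PySem.List.pyRange 0 (k : Int) 1).map (fun i => dir * (i * (i + 1) / 2))) := by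
  induction k with
  | zero => simp [PySem.List.pyRange_one_eq_nil]
  | succ k ih =>
    have h : PySem.List.pyRange 0 ((k : Int) + 1) 1
        = PySem.List.pyRange 0 (k : Int) 1 ++ [(k : Int)] :=
      PySem.List.pyRange_one_succ_right (by positivity)
    obtain ⟨c, hc⟩ : Even ((k : Int) * ((k : Int) - 1)) := Int.even_mul_pred_self (k : Int)
    have e1 : (k : Int) * ((k : Int) + 1) = (k : Int) * ((k : Int) - 1) + 2 * k := by ring
    have hsum : (k : Int) * ((k : Int) - 1) / 2 + k = (k : Int) * ((k : Int) + 1) / 2 := by omega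
    have e2 : ((k : Int) + 1) * ((k : Int) + 1 - 1) = (k : Int) * ((k : Int) + 1) := by ring
    push_cast
    rw [h, List.foldl_append, List.map_append, ih]
    simp only [List.foldl_cons, List.foldl_nil, List.map_cons, List.map_nil]
    rw [Prod.mk.injEq, e2]
    exact ⟨hsum, by rw [hsum]⟩

-- B's countdown loop emits the triangular values of j, j-1, …, j-k+1 (in that order) after acc.
lemma sum_of_n_altLoop_eq (neg : Bool) (k : Nat) :
    ∀ (j : Int) (acc : List Int),
    sum_of_n_altLoop neg k j (j * (j + 1) / 2) acc
      = acc ++ ((PySem.List.pyRange (j + 1 - k) (j + 1) 1).map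
          (fun i => if neg then -(i * (i + 1) / 2) else i * (i + 1) / 2)).reverse := by
  induction k with
  | zero =>
    intro j acc
    simp [sum_of_n_altLoop, PySem.List.pyRange_one_eq_nil]
  | succ k ih =>
    intro j acc
    have hr : PySem.List.pyRange (j + 1 - (k + 1 : Nat)) (j + 1) 1
        = PySem.List.pyRange (j + 1 - (k + 1 : Nat)) j 1 ++ [j] := by
      have h1 : PySem.List.pyRange (j - (k : Nat)) (j + 1) 1
          = PySem.List.pyRange (j - (k : Nat)) j 1 ++ [j] :=
        PySem.List.pyRange_one_succ_right (by omega)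
      have he : j + 1 - ((k : Nat) + 1 : Nat) = j - (k : Nat) := by push_cast; omega
      rw [he]; exact h1
    have ht : j * (j + 1) / 2 - j = (j - 1) * ((j - 1) + 1) / 2 := by
      have := tri_pred j; have e : (j - 1) + 1 = j := by ring
      rw [e]; exact this
    have hrange : j - 1 + 1 - (k : Int) = j + 1 - ((k : Nat) + 1 : Nat) := by push_cast; omega
    have hrange2 : j - 1 + 1 = j := by ring
    calc sum_of_n_altLoop neg (k + 1) j (j * (j + 1) / 2) acc
        = sum_of_n_altLoop neg k (j - 1) ((j - 1) * ((j - 1) + 1) / 2)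
            (acc ++ [if neg then -(j * (j + 1) / 2) else j * (j + 1) / 2]) := by
          rw [sum_of_n_altLoop, ht]
      _ = acc ++ [if neg then -(j * (j + 1) / 2) else j * (j + 1) / 2]
            ++ ((PySem.List.pyRange (j - 1 + 1 - k) (j - 1 + 1) 1).map
              (fun i => if neg then -(i * (i + 1) / 2) else i * (i + 1) / 2)).reverse := ih _ _
      _ = acc ++ ((PySem.List.pyRange (j + 1 - ((k : Nat) + 1 : Nat)) (j + 1) 1).map
              (fun i => if neg then -(i * (i + 1) / 2) else i * (i + 1) / 2)).reverse := by
          rw [hrange, hrange2, hr]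
          simp [List.map_append, List.reverse_append]

-- ===== VERDICT (by name: the statement is the Claim_ definition above) =====
theorem sum_of_n_spec : Claim_equal_sum_of_n := by
  intro n _
  unfold Spec_sum_of_n sum_of_n sum_of_n_alt
  simp only []
  have habs : |n| + 1 = ((n.natAbs + 1 : Nat) : Int) := by
    push_cast; rw [Int.abs_eq_natAbs]
  rw [tri_floordiv, sum_of_n_altLoop_eq]
  have h0 : |n| + 1 - ((n.natAbs + 1 : Nat) : Int) = 0 := by
    push_cast; rw [Int.abs_eq_natAbs]; ring
  rw [h0, List.nil_append, List.reverse_reverse, habs, sum_of_n_fold, ← habs]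
  apply List.map_congr_left
  intro i hi
  have h0i : 0 ≤ i := (PySem.List.mem_pyRange_one.mp hi).1
  by_cases hn : n < 0
  · have : ¬ 0 ≤ n := by omega
    simp [hn, this]
  · have : 0 ≤ n := by omega
    simp [hn, this]
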